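-- pv_equiv track=rewrite | github.com/ellagasta/adventofcode2021 | 8/seven.py | solve_input
-- ===== SOURCE A (Python) =====
-- segment_signatures = { # segment: (# count, min seg length number)
-- 	'a':(8, 3),
-- 	'b':(6, 4),
-- 	'c':(8, 2),
-- 	'd':(7, 4),
-- 	'e':(4, 5),
-- 	'f':(9, 2),
-- 	'g':(7, 5)
-- }
--
-- def solve_input(input_line):
-- 	signature_map = {
-- 		'a':(0,10),
-- 		'b':(0,10),
-- 		'c':(0,10),
-- 		'd':(0,10),
-- 		'e':(0,10),
-- 		'f':(0,10),
-- 		'g':(0,10)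
-- 	}
-- 	for input_segments in input_line:
-- 		for segment in input_segments:
-- 			prev_count, min_seg = signature_map[segment]
-- 			signature_map[segment] = (prev_count + 1, min(min_seg, len(input_segments)))
--
-- 	output_to_input_map = {}
-- 	for output_segment, output_signature in signature_map.items():
-- 		for input_segment, input_signature in segment_signatures.items():
-- 			if output_signature == input_signature:
-- 				output_to_input_map[output_segment] = input_segment
--
-- 	return output_to_input_map
-- ===== SOURCE B (Python) =====
-- segment_signatures = { # segment: (# count, min seg length number)
-- 	'a':(8, 3),
-- 	'b':(6, 4),
-- 	'c':(8, 2),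
-- 	'd':(7, 4),
-- 	'e':(4, 5),
-- 	'f':(9, 2),
-- 	'g':(7, 5)
-- }
--
-- by_signature = {sig: seg for seg, sig in segment_signatures.items()}
--
-- def solve_input(input_line):
-- 	chars = [ch for w in input_line for ch in w]
-- 	output_to_input_map = {}
-- 	for seg in 'abcdefg':
-- 		lens = [len(w) for w in input_line if seg in w]
-- 		signature = (chars.count(seg), min(lens, default=10))
-- 		match = by_signature.get(signature)
-- 		if match is not None:
-- 			output_to_input_map[seg] = match
-- 	return output_to_input_map
-- ===== Notes on version B (the rewrite author's own statement) =====
-- stated objective: idiomatic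
-- what changed: B replaces A's char-by-char dict accumulation plus a 7x7 nested table scan by one pass per segment letter (character count and min length of containing words) with an inverted signature-to-segment dict lookup, skipping unmatched signatures via .get.
-- crash fix: On any input containing a character outside 'a'..'g' A raises KeyError from signature_map[segment]; B simply ignores such characters and returns the map built from the recognised segments. — e.g. on solve_input(["ah"]): A raises KeyError, B returns []
import Mathlib
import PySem

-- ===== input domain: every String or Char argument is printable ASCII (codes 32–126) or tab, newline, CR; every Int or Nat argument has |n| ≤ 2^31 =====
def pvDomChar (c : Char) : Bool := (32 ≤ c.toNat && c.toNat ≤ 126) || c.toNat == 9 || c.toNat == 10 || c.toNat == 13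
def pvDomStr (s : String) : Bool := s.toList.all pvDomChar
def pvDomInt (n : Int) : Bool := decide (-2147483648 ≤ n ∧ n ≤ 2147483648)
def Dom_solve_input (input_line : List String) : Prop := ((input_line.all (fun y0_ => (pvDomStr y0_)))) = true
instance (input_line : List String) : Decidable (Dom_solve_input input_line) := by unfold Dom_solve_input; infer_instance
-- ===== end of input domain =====

-- B replaces A's char-by-char dict accumulation and inner 7-element table scan by one
-- per-segment pass (count + min length of containing words) with an inverted signature→segment lookup (objective: idiomatic).

-- ===== PORT A =====
-- module-level constant segment_signatures
def segmentSignatures : PySem.Dict String (Int × Int) :=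
  PySem.Dict.mk [("a", (8, 3)), ("b", (6, 4)), ("c", (8, 2)), ("d", (7, 4)),
                 ("e", (4, 5)), ("f", (9, 2)), ("g", (7, 5))]

-- initial signature_map literal
def initSignatureMap : PySem.Dict String (Int × Int) :=
  PySem.Dict.mk [("a", (0, 10)), ("b", (0, 10)), ("c", (0, 10)), ("d", (0, 10)),
                 ("e", (0, 10)), ("f", (0, 10)), ("g", (0, 10))]

def solve_input (input_line : List String) : List (String × String) :=
  let signature_map := input_line.foldl (fun sm input_segments =>
    input_segments.toList.foldl (fun sm segment =>
      -- signature_map[segment] raises KeyError for a segment outside 'a'..'g';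
      -- Pre_ excludes those inputs, so getD with the (never used) default is exact there
      let prev := sm.getD (String.singleton segment) (0, 10)
      sm.insert (String.singleton segment) (prev.1 + 1, min prev.2 (PySem.Str.len input_segments))) sm)
    initSignatureMap
  let output_to_input_map := signature_map.items.foldl (fun out p =>
    segmentSignatures.items.foldl (fun out q =>
      if p.2 == q.2 then out.insert p.1 q.1 else out) out) PySem.Dict.empty
  output_to_input_map.items

-- ===== PORT B =====
-- module-level constant by_signature = {sig: seg for seg, sig in segment_signatures.items()}
def bySignature : PySem.Dict (Int × Int) String :=
  PySem.Dict.ofList (segmentSignatures.items.map (fun p => (p.2, p.1)))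

def solve_input_alt (input_line : List String) : List (String × String) :=
  let chars := input_line.flatMap (fun w => w.toList)
  let output_to_input_map := "abcdefg".toList.foldl (fun out seg =>
    let lens := (input_line.filter (fun w => PySem.Str.isIn (String.singleton seg) w)).map
      (fun w => PySem.Str.len w)
    let signature : Int × Int := ((PySem.List.count chars seg : Int), PySem.List.minD lens (fun x => x) 10)
    match bySignature.get? signature with
    | some m => out.insert (String.singleton seg) m
    | none => out) PySem.Dict.empty
  output_to_input_map.items

-- ===== PRECONDITION & SPEC =====
-- Pre_ excludes exactly the inputs containing a character outside 'a'..'g', on which A raises KeyError.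
def Pre_solve_input (input_line : List String) : Prop :=
  (input_line.all (fun w => w.toList.all (fun c =>
    (['a', 'b', 'c', 'd', 'e', 'f', 'g'] : List Char).contains c))) = true
instance (input_line : List String) : Decidable (Pre_solve_input input_line) := by
  unfold Pre_solve_input; infer_instance
def pvWitness_solve_input : List String := ["ab", "acdfg", "", "gg"]

-- On any input with a character outside 'a'..'g' A raises KeyError; B returns the map built from the remaining segments.
def Raises_solve_input (input_line : List String) : Prop :=
  (input_line.any (fun w => w.toList.any (fun c =>
    !(['a', 'b', 'c', 'd', 'e', 'f', 'g'] : List Char).contains c))) = true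
instance (input_line : List String) : Decidable (Raises_solve_input input_line) := by
  unfold Raises_solve_input; infer_instance
def pvRaiseWitness_solve_input : List String := ["ah"]
def pvRaiseWitnessOut_solve_input : List (String × String) := []

def Spec_solve_input (input_line : List String) (out : List (String × String)) : Prop :=
  out = solve_input_alt input_line
instance (input_line : List String) (out : List (String × String)) : Decidable (Spec_solve_input input_line out) := by
  unfold Spec_solve_input; infer_instance

-- ===== CLAIM (what is proved, stated in full; the proofs are below) =====
def Claim_equal_solve_input : Prop := ∀ (input_line : List String), Dom_solve_input input_line →
  Pre_solve_input input_line → Spec_solve_input input_line (solve_input input_line)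
def Claim_raises_solve_input : Prop :=
  (∀ (input_line : List String), Dom_solve_input input_line → Raises_solve_input input_line →
    ¬ Pre_solve_input input_line) ∧
  (Dom_solve_input (pvRaiseWitness_solve_input) ∧ Raises_solve_input (pvRaiseWitness_solve_input) ∧
    solve_input_alt (pvRaiseWitness_solve_input) = pvRaiseWitnessOut_solve_input)

-- ===== LEMMAS AND PROOFS =====

-- `seg in w` for a one-character seg is character membership
theorem pvIsIn_singleton (k : Char) (w : String) :
    PySem.Str.isIn (String.singleton k) w = w.toList.contains k := by
  have hs : (String.singleton k).toList = [k] := by simp [String.singleton]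
  simp only [PySem.Str.isIn_eq, hs]
  rcases h : PySem.Chars.isIn [k] w.toList with _ | _
  · rw [PySem.Chars.isIn_eq_false_iff] at h
    simp [List.singleton_infix_iff] at h
    simp [h]
  · rw [PySem.Chars.isIn_iff_infix] at h
    simp [List.singleton_infix_iff] at h
    simp [h]

theorem pvSingleton_ne {a b : Char} (h : a ≠ b) : String.singleton a ≠ String.singleton b := by
  simpa [String.singleton] using h

-- running min-accumulator of A, per segment character
def pvMAcc (k : Char) (l : List String) (m : Int) : Int :=
  l.foldl (fun m w => if w.toList.count k = 0 then m else min m (PySem.Str.len w)) m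

theorem pvInner_getD (cs : List Char) (L : Int) (k : Char) : ∀ (sm : PySem.Dict String (Int × Int)),
    (cs.foldl (fun sm c => sm.insert (String.singleton c)
        ((sm.getD (String.singleton c) (0, 10)).1 + 1,
         min (sm.getD (String.singleton c) (0, 10)).2 L)) sm).getD (String.singleton k) (0, 10)
    = ((sm.getD (String.singleton k) (0, 10)).1 + cs.count k,
       if cs.count k = 0 then (sm.getD (String.singleton k) (0, 10)).2
       else min (sm.getD (String.singleton k) (0, 10)).2 L) := by
  induction cs with
  | nil => intro sm; simp
  | cons a t ih =>
    intro sm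
    simp only [List.foldl_cons]
    rw [ih]
    by_cases hak : a = k
    · subst hak
      rw [PySem.Dict.getD_insert_self, Prod.mk.injEq]
      constructor
      · simp; omega
      · by_cases ht : t.count a = 0 <;> simp [ht]
    · rw [PySem.Dict.getD_insert_of_ne _ _ _ (pvSingleton_ne (Ne.symm hak))]
      simp [hak]

theorem pvInner_contains (cs : List Char) (L : Int) (x : String) :
    ∀ (sm : PySem.Dict String (Int × Int)), sm.contains x = true →
    ((cs.foldl (fun sm c => sm.insert (String.singleton c)
        ((sm.getD (String.singleton c) (0, 10)).1 + 1,
         min (sm.getD (String.singleton c) (0, 10)).2 L)) sm).contains x) = true := by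
  induction cs with
  | nil => intro sm h; simpa using h
  | cons a t ih =>
    intro sm h
    simp only [List.foldl_cons]
    exact ih _ (by rw [PySem.Dict.contains_insert]; simp [h])

theorem pvInner_keys (cs : List Char) (L : Int) :
    ∀ (sm : PySem.Dict String (Int × Int)), (∀ c ∈ cs, sm.contains (String.singleton c) = true) →
    (cs.foldl (fun sm c => sm.insert (String.singleton c)
        ((sm.getD (String.singleton c) (0, 10)).1 + 1,
         min (sm.getD (String.singleton c) (0, 10)).2 L)) sm).keys = sm.keys := by
  induction cs with
  | nil => intro sm _; rfl
  | cons a t ih =>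
    intro sm h
    simp only [List.foldl_cons]
    rw [ih _ (fun c hc => by rw [PySem.Dict.contains_insert]; simp [h c (List.mem_cons_of_mem _ hc)]),
        PySem.Dict.keys_insert_of_contains _ _ (h a (List.mem_cons_self))]

def pvOuter (l : List String) (sm : PySem.Dict String (Int × Int)) : PySem.Dict String (Int × Int) :=
  l.foldl (fun sm input_segments =>
    input_segments.toList.foldl (fun sm segment =>
      sm.insert (String.singleton segment)
        ((sm.getD (String.singleton segment) (0, 10)).1 + 1,
         min (sm.getD (String.singleton segment) (0, 10)).2 (PySem.Str.len input_segments))) sm) sm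

theorem pvOuter_getD (l : List String) (k : Char) : ∀ (sm : PySem.Dict String (Int × Int)),
    (pvOuter l sm).getD (String.singleton k) (0, 10)
    = ((sm.getD (String.singleton k) (0, 10)).1 + ((l.flatMap (fun w => w.toList)).count k : Int),
       pvMAcc k l (sm.getD (String.singleton k) (0, 10)).2) := by
  induction l with
  | nil => intro sm; simp [pvOuter, pvMAcc]
  | cons w t ih =>
    intro sm
    simp only [pvOuter, List.foldl_cons] at ih ⊢
    rw [ih, pvInner_getD]
    simp only [pvMAcc, List.foldl_cons, List.flatMap_cons, List.count_append]
    rw [Prod.mk.injEq]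
    constructor
    · simp; ring
    · by_cases hc : w.toList.count k = 0 <;> simp [hc]

theorem pvOuter_keys (l : List String) : ∀ (sm : PySem.Dict String (Int × Int)),
    (∀ w ∈ l, ∀ c ∈ w.toList, sm.contains (String.singleton c) = true) →
    (pvOuter l sm).keys = sm.keys := by
  induction l with
  | nil => intro sm _; rfl
  | cons w t ih =>
    intro sm h
    simp only [pvOuter, List.foldl_cons] at ih ⊢
    rw [ih _ (fun w' hw' c hc => pvInner_contains _ _ _ _ (h w' (List.mem_cons_of_mem _ hw') c hc)),
        pvInner_keys _ _ _ (fun c hc => h w List.mem_cons_self c hc)]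

theorem pvBySig_lit : bySignature = PySem.Dict.mk
    [((8, 3), "a"), ((6, 4), "b"), ((8, 2), "c"), ((7, 4), "d"),
     ((4, 5), "e"), ((9, 2), "f"), ((7, 5), "g")] := by
  decide

-- A's inner table scan is B's inverted lookup
theorem pvScan_eq (out : PySem.Dict String String) (key : String) (p : Int × Int) :
    segmentSignatures.items.foldl (fun out q => if p == q.2 then out.insert key q.1 else out) out
    = match bySignature.get? p with
      | some v => out.insert key v
      | none => out := by
  obtain ⟨n, m⟩ := p
  rw [pvBySig_lit]
  show List.foldl _ out [("a", ((8:Int), (3:Int))), ("b", (6, 4)), ("c", (8, 2)), ("d", (7, 4)),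
         ("e", (4, 5)), ("f", (9, 2)), ("g", (7, 5))] = _
  simp only [List.foldl_cons, List.foldl_nil, PySem.Dict.get?_mk_cons, beq_iff_eq]
  by_cases h1 : (n, m) = ((8:Int), (3:Int))
  · simp [h1]
  by_cases h2 : (n, m) = ((6:Int), (4:Int))
  · simp [h2]
  by_cases h3 : (n, m) = ((8:Int), (2:Int))
  · simp [h3]
  by_cases h4 : (n, m) = ((7:Int), (4:Int))
  · simp [h4]
  by_cases h5 : (n, m) = ((4:Int), (5:Int))
  · simp [h5]
  by_cases h6 : (n, m) = ((9:Int), (2:Int))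
  · simp [h6]
  by_cases h7 : (n, m) = ((7:Int), (5:Int))
  · simp [h7]
  · simp only [h1, h2, h3, h4, h5, h6, h7, if_false]
    rw [if_neg (fun h => h1 h.symm), if_neg (fun h => h2 h.symm), if_neg (fun h => h3 h.symm),
        if_neg (fun h => h4 h.symm), if_neg (fun h => h5 h.symm), if_neg (fun h => h6 h.symm),
        if_neg (fun h => h7 h.symm)]
    rfl

theorem pvGet?_clamp (n t : Int) : bySignature.get? (n, min 10 t) = bySignature.get? (n, t) := by
  rcases le_total t 10 with h | h
  · rw [min_eq_right h]
  · rw [min_eq_left h]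
    rcases eq_or_lt_of_le h with rfl | hlt
    · rfl
    · have h2 : ((2:Int)) ≠ t := by omega
      have h3 : ((3:Int)) ≠ t := by omega
      have h4 : ((4:Int)) ≠ t := by omega
      have h5 : ((5:Int)) ≠ t := by omega
      rw [pvBySig_lit]
      simp [Prod.ext_iff, h2, h3, h4, h5, PySem.Dict.get?]

theorem pvMAcc_eq_foldl (k : Char) (l : List String) : ∀ (m : Int),
    pvMAcc k l m
    = ((l.filter (fun w => PySem.Str.isIn (String.singleton k) w)).map
        (fun w => PySem.Str.len w)).foldl min m := by
  induction l with
  | nil => intro m; rfl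
  | cons w t ih =>
    intro m
    by_cases hc : w.toList.count k = 0
    · have hf : PySem.Str.isIn (String.singleton k) w = false := by
        rw [pvIsIn_singleton]
        simp [List.count_eq_zero] at hc
        simp [hc]
      simp only [pvMAcc, List.foldl_cons, List.filter_cons, hf, if_pos hc]
      simpa [pvMAcc] using ih m
    · have hf : PySem.Str.isIn (String.singleton k) w = true := by
        rw [pvIsIn_singleton]
        have := List.count_pos_iff.mp (Nat.pos_of_ne_zero hc)
        simp [this]
      simp only [pvMAcc, List.foldl_cons, List.filter_cons, hf, if_neg hc]
      simpa [pvMAcc] using ih (min m (PySem.Str.len w))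

theorem pvM_bridge (l : List String) (k : Char) (n : Int) :
    bySignature.get? (n, pvMAcc k l 10)
    = bySignature.get? (n, PySem.List.minD
        ((l.filter (fun w => PySem.Str.isIn (String.singleton k) w)).map (fun w => PySem.Str.len w))
        (fun x => x) 10) := by
  rw [pvMAcc_eq_foldl]
  rcases hl : (l.filter (fun w => PySem.Str.isIn (String.singleton k) w)).map
      (fun w => PySem.Str.len w) with _ | ⟨x, t⟩
  · rfl
  · rw [List.foldl_cons, List.foldl_assoc, PySem.List.minD, PySem.List.min?_id_cons]
    exact pvGet?_clamp n (t.foldl min x)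

theorem pvA_getD (l : List String) (k : Char)
    (h : initSignatureMap.getD (String.singleton k) (0, 10) = (0, 10)) :
    (pvOuter l initSignatureMap).getD (String.singleton k) (0, 10)
    = (((l.flatMap (fun w => w.toList)).count k : Int), pvMAcc k l 10) := by
  rw [pvOuter_getD, h]
  simp

-- ===== VERDICT (by name: the statement is the Claim_ definition above) =====
theorem solve_input_spec : Claim_equal_solve_input := by
  intro l _ hpre
  unfold Pre_solve_input at hpre
  simp only [List.all_eq_true] at hpre
  unfold Spec_solve_input
  have hA : solve_input l
      = ((pvOuter l initSignatureMap).items.foldl (fun out p =>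
          segmentSignatures.items.foldl (fun out q =>
            if p.2 == q.2 then out.insert p.1 q.1 else out) out) PySem.Dict.empty).items := rfl
  have hcont : ∀ w ∈ l, ∀ c ∈ w.toList, initSignatureMap.contains (String.singleton c) = true := by
    intro w hw c hc
    have hmem : c ∈ (['a', 'b', 'c', 'd', 'e', 'f', 'g'] : List Char) := by
      simpa using hpre w hw c hc
    fin_cases hmem <;> decide
  have hk : (pvOuter l initSignatureMap).keys = initSignatureMap.keys := pvOuter_keys l _ hcont
  have hnd : (pvOuter l initSignatureMap).keys.Nodup := by rw [hk]; decide
  have hitems := PySem.Dict.items_eq_map_keys (pvOuter l initSignatureMap) hnd ((0:Int), (10:Int))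
  rw [hk] at hitems
  rw [hA, hitems]
  rw [show initSignatureMap.keys = [String.singleton 'a', String.singleton 'b', String.singleton 'c',
      String.singleton 'd', String.singleton 'e', String.singleton 'f', String.singleton 'g'] from rfl]
  simp only [List.map_cons, List.map_nil]
  rw [pvA_getD l 'a' rfl, pvA_getD l 'b' rfl, pvA_getD l 'c' rfl, pvA_getD l 'd' rfl,
      pvA_getD l 'e' rfl, pvA_getD l 'f' rfl, pvA_getD l 'g' rfl]
  simp only [List.foldl_cons, List.foldl_nil]
  simp only [pvScan_eq]
  simp only [pvM_bridge]
  show _ = solve_input_alt l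
  simp only [solve_input_alt]
  rw [show "abcdefg".toList = ['a', 'b', 'c', 'd', 'e', 'f', 'g'] from rfl]
  simp only [List.foldl_cons, List.foldl_nil, PySem.List.count_eq]

@[simp] theorem solve_input_raises : Claim_raises_solve_input := by
  unfold Claim_raises_solve_input
  refine ⟨?_, by decide, by decide, by decide⟩
  intro l _ hr hpre
  unfold Raises_solve_input at hr
  unfold Pre_solve_input at hpre
  simp only [List.any_eq_true, List.all_eq_true] at hr hpre
  obtain ⟨w, hw, c, hc, hbad⟩ := hr
  exact absurd (hpre w hw c hc) (by simpa using hbad)
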